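-- pv_equiv track=rewrite | github.com/jonusHK/algorithm_data_structure | practice/practice_45.py | solution
-- ===== SOURCE A (Python) =====
-- def solution(s):
--     cnt = {}
--
--     for i in s:
--         if i not in cnt:
--             cnt[i] = 0
--
--         cnt[i] += 1
--
--     string = ''
--     for v, c in sorted(cnt.items(), key=lambda x: (-x[1], x[0])):
--         string += v * c
--
--     return string
-- ===== SOURCE B (Python) =====
-- def solution(s):
--     cnt = {}
--     for ch in s:
--         cnt[ch] = cnt.get(ch, 0) + 1
--     return ''.join(sorted(s, key=lambda ch: (-cnt[ch], ch)))
-- ===== Notes on version B (the rewrite author's own statement) =====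
-- stated objective: simpler
-- what changed: B sorts the characters of s themselves by the key (-frequency, char) and joins them, instead of sorting the distinct dict items and rebuilding each run with string multiplication.
import Mathlib
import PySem

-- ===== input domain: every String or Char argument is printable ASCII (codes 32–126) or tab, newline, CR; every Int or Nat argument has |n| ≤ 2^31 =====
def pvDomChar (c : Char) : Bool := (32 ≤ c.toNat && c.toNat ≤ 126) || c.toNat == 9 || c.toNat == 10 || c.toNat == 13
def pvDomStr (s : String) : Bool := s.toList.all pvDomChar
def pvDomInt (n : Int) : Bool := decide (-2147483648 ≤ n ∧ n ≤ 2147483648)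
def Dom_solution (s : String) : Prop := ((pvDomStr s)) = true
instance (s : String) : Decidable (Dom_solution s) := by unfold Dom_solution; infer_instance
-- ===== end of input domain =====

-- B sorts the characters of s themselves by the key (-frequency, char) and joins them,
-- instead of A's sort of the distinct dict items followed by string multiplication (objective: simpler).

-- ===== PORT A =====
-- string accumulation and `v * c` (v a one-char string, c ≥ 0 here) are ported over List Char:
-- `st += v * c` is `st ++ List.replicate c.toNat v` (exact; negative c would give '' = replicate 0).
def solution (s : String) : String :=
  let cnt := s.toList.foldl
    (fun d i =>
      let d' := if d.contains i then d else d.insert i 0   -- if i not in cnt: cnt[i] = 0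
      d'.insert i (d'.getD i 0 + 1))                       -- cnt[i] += 1
    PySem.Dict.empty
  let pairs := PySem.List.sorted2 cnt.items (fun x => -x.2) (fun x => x.1) false
  String.ofList (pairs.foldl (fun st p => st ++ List.replicate p.2.toNat p.1) [])

-- ===== PORT B =====
-- ''.join over the sorted characters is String.ofList of the sorted char list (exact).
def solution_alt (s : String) : String :=
  let cnt := s.toList.foldl (fun d ch => d.insert ch (d.getD ch 0 + 1)) PySem.Dict.empty
  String.ofList (PySem.List.sorted2 s.toList (fun ch => -(cnt.getD ch 0)) (fun ch => ch) false)

-- ===== PRECONDITION & SPEC =====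
def Spec_solution (s : String) (out : String) : Prop := out = solution_alt s
instance (s : String) (out : String) : Decidable (Spec_solution s out) := by unfold Spec_solution; infer_instance

-- ===== CLAIM (what is proved, stated in full; the proofs are below) =====
def Claim_equal_solution : Prop := ∀ (s : String), Dom_solution s → Spec_solution s (solution s)

-- ===== LEMMAS AND PROOFS =====

-- A's counting loop (membership test + increment) builds exactly Counter(s).
theorem countA_eq (cs : List Char) :
    cs.foldl
      (fun d i =>
        let d' := if d.contains i then d else d.insert i 0
        d'.insert i (d'.getD i 0 + 1))
      PySem.Dict.empty = PySem.Dict.counter cs := by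
  have hstep : (fun (d : PySem.Dict Char Int) i =>
      let d' := if d.contains i then d else d.insert i 0
      d'.insert i (d'.getD i 0 + 1)) = fun d i => d.insert i (d.getD i 0 + 1) := by
    funext d i
    by_cases h : d.contains i = true
    · simp [h]
    · have h' : d.contains i = false := by simpa using h
      simp [h', PySem.Dict.getD_insert_self, PySem.Dict.insert_insert_self,
        PySem.Dict.getD_of_not_contains d 0 h']
  rw [hstep, PySem.Dict.foldl_insert_getD_add_one_eq_counter]

-- A Python tuple key (k1 x, k2 x) with Int/Char components is the lexicographic single key.
theorem sorted2_eq_sorted_lex {α : Type} (xs : List α) (k1 : α → Int) (k2 : α → Char) :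
    PySem.List.sorted2 xs k1 k2 false
      = PySem.List.sorted xs (fun x => toLex (k1 x, k2 x)) false := by
  show List.foldl _ [] xs = List.foldl _ [] xs
  congr 1
  funext acc x
  congr 1
  funext a b
  rcases lt_trichotomy (k1 a) (k1 b) with h | h | h
  · simp [Prod.Lex.lt_iff, h]
  · simp [Prod.Lex.lt_iff, h]
  · simp [Prod.Lex.lt_iff, h, not_lt_of_gt h, ne_of_gt h]

-- sum over a nodup list of a one-point indicator
theorem sum_map_indicator {x : Char} (g : Char → Nat) :
    ∀ (l : List Char), l.Nodup →
      (l.map fun k => if k = x then g k else 0).sum = if x ∈ l then g x else 0 := by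
  intro l hl
  induction l with
  | nil => simp
  | cons a t ih =>
    rcases List.nodup_cons.mp hl with ⟨ha, ht⟩
    by_cases hax : a = x
    · subst hax
      simp [ha, ih ht]
    · simp [hax, ih ht, Ne.symm hax]

-- concatenating count-many copies of each distinct character is a permutation of cs
theorem flatMap_replicate_perm (cs : List Char) :
    ((PySem.Set.ofList cs).flatMap fun k => List.replicate (cs.count k) k).Perm cs := by
  rw [List.perm_iff_count]
  intro x
  rw [List.count_flatMap]
  have : ((PySem.Set.ofList cs).map (List.count x ∘ fun k => List.replicate (cs.count k) k))
      = ((PySem.Set.ofList cs).map fun k => if k = x then cs.count k else 0) := by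
    apply List.map_congr_left
    intro k _
    simp [List.count_replicate, beq_iff_eq]
  rw [this, sum_map_indicator _ _ (PySem.Set.nodup_ofList cs)]
  by_cases hx : x ∈ cs
  · simp [(PySem.Set.mem_ofList cs x).mpr hx]
  · simp [hx, List.count_eq_zero_of_not_mem hx]

-- ===== VERDICT (by name: the statement is the Claim_ definition above) =====
theorem solution_spec : Claim_equal_solution := by
  intro s _
  unfold Spec_solution solution solution_alt
  rw [countA_eq, PySem.Dict.foldl_insert_getD_add_one_eq_counter]
  dsimp only
  set cs := s.toList with hcs
  congr 1
  -- rewrite B's key to the plain count, then both tuple keys to Lex keys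
  have hkeyB : (fun ch => -((PySem.Dict.counter cs).getD ch 0)) = fun ch => -((cs.count ch : Int)) := by
    funext ch; rw [PySem.Dict.getD_counter]
  rw [hkeyB, sorted2_eq_sorted_lex, sorted2_eq_sorted_lex,
    PySem.List.foldl_append_eq_flatMap, List.nil_append]
  set e : Char → Lex (Int × Char) := fun ch => toLex (-(cs.count ch : Int), ch) with he
  set e' : Char × Int → Lex (Int × Char) := fun p => toLex (-p.2, p.1) with he'
  set ys := PySem.List.sorted (PySem.Dict.counter cs).items e' false with hys
  have hmem : ∀ p ∈ ys, p.2 = (cs.count p.1 : Int) ∧ p.1 ∈ cs := by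
    intro p hp
    have hp' : p ∈ (PySem.Dict.counter cs).items := (PySem.List.mem_sorted _ _ _ _).mp hp
    rw [PySem.Dict.items_counter] at hp'
    rcases List.mem_map.mp hp' with ⟨k, hk, hkp⟩
    subst hkp
    exact ⟨rfl, (PySem.Set.mem_ofList cs k).mp hk⟩
  apply PySem.List.eq_of_perm_of_pairwise_le_of_injective e
  · intro a b h
    have := congrArg (fun z => (ofLex z).2) h
    simpa [he] using this
  · -- permutation: both sides permute cs
    have h1 : ys.Perm (PySem.Dict.counter cs).items := PySem.List.sorted_perm _ _ _
    have h2 : (ys.flatMap fun p => List.replicate p.2.toNat p.1).Perm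
        ((PySem.Dict.counter cs).items.flatMap fun p => List.replicate p.2.toNat p.1) :=
      h1.flatMap (fun a _ => List.Perm.refl _)
    have h3 : ((PySem.Dict.counter cs).items.flatMap fun p => List.replicate p.2.toNat p.1)
        = (PySem.Set.ofList cs).flatMap fun k => List.replicate (cs.count k) k := by
      rw [PySem.Dict.items_counter, List.flatMap_map]
      simp
    have h4 := (h2.trans (h3 ▸ (flatMap_replicate_perm cs)))
    exact h4.trans (PySem.List.sorted_perm cs e false).symm
  · -- LHS is pairwise ≤ under e
    rw [List.pairwise_flatMap]
    constructor
    · intro p _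
      exact List.pairwise_replicate.mpr (Or.inr le_rfl)
    · have hsp : List.Pairwise (fun a b => e' a ≤ e' b) ys :=
        PySem.List.sorted_pairwise (PySem.Dict.counter cs).items e'
      refine hsp.imp_of_mem ?_
      intro p q hp hq hpq x hx y hy
      have hxp : x = p.1 := List.eq_of_mem_replicate hx
      have hyq : y = q.1 := List.eq_of_mem_replicate hy
      have hep : e x = e' p := by
        simp only [hxp, he, he']; rw [(hmem p hp).1]
      have heq : e y = e' q := by
        simp only [hyq, he, he']; rw [(hmem q hq).1]
      rw [hep, heq]; exact hpq
  · exact PySem.List.sorted_pairwise cs e
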